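-- pv_equiv track=rewrite | github.com/LeTeguis/Nkentseu | Scripts/commands/create.py | namespaceGuard
-- ===== SOURCE A (Python) =====
-- def separateNamespace(namespaceName):
--     return namespaceName.split("::")
--
-- def namespaceGuard(namespaceName, content):
--     namespaces = separateNamespace(namespaceName)
--
--     # Filtrer les namespaces invalides
--     filtered_namespaces = [ns for ns in namespaces if ns and ns[0].isalpha() and all(c.isalnum() or c == '_' for c in ns)]
--
--     if not filtered_namespaces:
--         return content
--
--     lastNamespaceIndex = len(filtered_namespaces) - 1
--     namespaceIndent = ""
--
--     while lastNamespaceIndex >= 0: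
--         if lastNamespaceIndex == len(filtered_namespaces) - 1:
--             namespaceIndent = f'''namespace {filtered_namespaces[lastNamespaceIndex]} {{
--     {content}
-- }}  //  {filtered_namespaces[lastNamespaceIndex]}'''
--         else:
--             namespaceIndent = f'''namespace {filtered_namespaces[lastNamespaceIndex]} {{
--     {namespaceIndent}
-- }}  //  {filtered_namespaces[lastNamespaceIndex]}'''
--         lastNamespaceIndex -= 1
--
--     return namespaceIndent
-- ===== SOURCE B (Python) =====
-- # B: builds all opening fragments and all closing fragments in single passes and
-- # concatenates once, instead of A's inside-out re-wrapping loop over indices.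
-- def namespaceGuard(namespaceName, content):
--     namespaces = namespaceName.split("::")
--     filtered = [ns for ns in namespaces if ns and ns[0].isalpha() and all(c.isalnum() or c == '_' for c in ns)]
--     prefixes = [f'namespace {ns} {{\n    ' for ns in filtered]
--     suffixes = [f'\n}}  //  {ns}' for ns in reversed(filtered)]
--     return ''.join(prefixes) + content + ''.join(suffixes)
-- ===== Notes on version B (the rewrite author's own statement) =====
-- stated objective: alternative
-- what changed: Replaces A's index-driven while-loop that re-wraps an accumulator string inside-out (with a branch distinguishing the innermost namespace) by two single-pass lists of opening and closing fragments joined around the content in one concatenation; the empty-filter guard disappears because joining empty lists yields the content unchanged.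
import Mathlib
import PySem

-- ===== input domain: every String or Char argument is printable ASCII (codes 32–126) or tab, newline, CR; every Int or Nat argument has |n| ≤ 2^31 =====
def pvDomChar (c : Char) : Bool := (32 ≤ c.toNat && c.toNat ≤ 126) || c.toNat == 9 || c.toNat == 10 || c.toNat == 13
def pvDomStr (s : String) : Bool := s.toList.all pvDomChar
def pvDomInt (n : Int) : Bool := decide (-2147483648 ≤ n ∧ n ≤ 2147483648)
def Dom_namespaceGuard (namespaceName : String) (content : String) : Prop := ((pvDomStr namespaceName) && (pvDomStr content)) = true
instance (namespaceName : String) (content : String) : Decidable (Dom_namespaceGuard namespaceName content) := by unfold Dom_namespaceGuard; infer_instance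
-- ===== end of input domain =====

-- B replaces A's inside-out accumulator re-wrapping loop by prefix/suffix fragment
-- lists joined around the content in one concatenation (objective: alternative).

-- ===== PORT A =====
-- the Python filter predicate: ns and ns[0].isalpha() and all(c.isalnum() or c == '_' for c in ns)
-- (exact on the printable-ASCII domain, where Char-level isalpha/isalnum match Python's)
def nsValid (ns : String) : Bool :=
  match ns.toList with
  | [] => false
  | c :: _ => PySem.Chars.isalpha c && ns.toList.all (fun d => PySem.Chars.isalnum d || d == '_')

-- the f-string of A's loop body: f'namespace {ns} {{\n    {x}\n}}  //  {ns}'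
def nsWrap (ns : String) (x : String) : String :=
  "namespace " ++ ns ++ " {\n    " ++ x ++ "\n}  //  " ++ ns

-- A's while-loop: lastNamespaceIndex counts down from len-1 to 0; fuel k = lastNamespaceIndex + 1
def nsLoopA (l : List String) (content : String) : Nat → String → String
  | 0, acc => acc
  | k + 1, acc =>
    let acc' := if k = l.length - 1 then nsWrap (l.getD k "") content
                else nsWrap (l.getD k "") acc
    nsLoopA l content k acc'

def namespaceGuard (namespaceName : String) (content : String) : String :=
  -- namespaceName.split("::"): sep is the nonempty literal "::", so split? is always some
  let namespaces := (PySem.Str.split? namespaceName "::").getD []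
  let filtered := namespaces.filter nsValid
  if filtered.isEmpty then content
  else nsLoopA filtered content filtered.length ""

-- ===== PORT B =====
def namespaceGuard_alt (namespaceName : String) (content : String) : String :=
  let namespaces := (PySem.Str.split? namespaceName "::").getD []
  let filtered := namespaces.filter nsValid
  let prefixes := filtered.map (fun ns => "namespace " ++ ns ++ " {\n    ")
  let suffixes := filtered.reverse.map (fun ns => "\n}  //  " ++ ns)
  PySem.Str.join "" prefixes ++ content ++ PySem.Str.join "" suffixes

-- ===== PRECONDITION & SPEC =====
def Spec_namespaceGuard (namespaceName : String) (content : String) (out : String) : Prop := out = namespaceGuard_alt namespaceName content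
instance (namespaceName : String) (content : String) (out : String) : Decidable (Spec_namespaceGuard namespaceName content out) := by unfold Spec_namespaceGuard; infer_instance

-- ===== CLAIM (what is proved, stated in full; the proofs are below) =====
def Claim_equal_namespaceGuard : Prop := ∀ (namespaceName : String) (content : String), Dom_namespaceGuard namespaceName content → Spec_namespaceGuard namespaceName content (namespaceGuard namespaceName content)

-- ===== LEMMAS AND PROOFS =====

theorem joinEmpty_cons (x : String) (xs : List String) :
    PySem.Str.join "" (x :: xs) = x ++ PySem.Str.join "" xs := by
  cases xs with
  | nil =>
    simp only [PySem.Str.join, List.map_cons, List.map_nil, PySem.Chars.join_singleton,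
      PySem.Chars.join_nil, String.ofList_toList]
    rw [show String.ofList [] = "" from rfl, String.append_empty]
  | cons y ys =>
    have h := PySem.Chars.join_cons_cons ("".toList) x.toList y.toList
      (ys.map String.toList)
    simp only [PySem.Str.join, List.map_cons] at h ⊢
    rw [h, String.ofList_append]
    simp [String.ofList_toList]

theorem joinEmpty_append (xs ys : List String) :
    PySem.Str.join "" (xs ++ ys) = PySem.Str.join "" xs ++ PySem.Str.join "" ys := by
  induction xs with
  | nil =>
    rw [List.nil_append, show PySem.Str.join "" ([] : List String) = "" from rfl,
      String.empty_append]
  | cons x xs ih =>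
    simp only [List.cons_append, joinEmpty_cons, ih, String.append_assoc]

-- A's loop with fuel k < length only takes the else-branch: it folds nsWrap over the first k elements
theorem nsLoopA_low (l : List String) (content : String) :
    ∀ (k : Nat), k + 1 ≤ l.length → ∀ acc,
      nsLoopA l content k acc = (l.take k).foldr nsWrap acc := by
  intro k
  induction k with
  | zero => intro _ acc; simp [nsLoopA]
  | succ k ih =>
    intro hk acc
    have hklt : k < l.length := by omega
    have hne : ¬ (k = l.length - 1) := by omega
    simp only [nsLoopA, hne, if_false]
    rw [ih (by omega)]
    have htake : l.take (k + 1) = l.take k ++ [l[k]] := by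
      rw [List.take_add_one]
      simp [List.getElem?_eq_getElem hklt]
    rw [htake, List.foldr_append]
    simp [List.getD_eq_getElem?_getD, List.getElem?_eq_getElem hklt]

-- the full loop is the right fold of nsWrap over the whole list
theorem nsLoopA_foldr (l : List String) (content : String) (h : l ≠ []) :
    nsLoopA l content l.length "" = l.foldr nsWrap content := by
  obtain ⟨m, hm⟩ : ∃ m, l.length = m + 1 := by
    cases l with
    | nil => exact absurd rfl h
    | cons a t => exact ⟨t.length, rfl⟩
  have hmlt : m < l.length := by omega
  have hcond : m = l.length - 1 := by omega
  rw [hm]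
  simp only [nsLoopA]
  rw [if_pos hcond]
  rw [nsLoopA_low l content m (by omega)]
  have htake : l.take (m + 1) = l.take m ++ [l[m]] := by
    rw [List.take_add_one]
    simp [List.getElem?_eq_getElem hmlt]
  have hfull : l.take (m + 1) = l := by
    rw [← hm]; exact List.take_length
  conv_rhs => rw [← hfull, htake]
  rw [List.foldr_append]
  simp [List.getD_eq_getElem?_getD, List.getElem?_eq_getElem hmlt]

-- the fold of nsWrap equals prefixes ++ content ++ suffixes
theorem foldr_nsWrap_eq (l : List String) (content : String) :
    l.foldr nsWrap content =
      PySem.Str.join "" (l.map (fun ns => "namespace " ++ ns ++ " {\n    ")) ++ content ++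
        PySem.Str.join "" (l.reverse.map (fun ns => "\n}  //  " ++ ns)) := by
  induction l with
  | nil =>
    simp only [List.foldr_nil, List.map_nil, List.reverse_nil,
      show PySem.Str.join "" ([] : List String) = "" from rfl]
    rw [String.append_empty, String.empty_append]
  | cons a l ih =>
    simp only [List.foldr_cons, List.map_cons, List.reverse_cons, List.map_append,
      List.map_nil, joinEmpty_cons, joinEmpty_append, ih, nsWrap,
      show PySem.Str.join "" ([] : List String) = "" from rfl]
    simp only [String.append_assoc, String.append_empty]

-- the common shape of both ports, over an arbitrary filtered list
theorem guard_if_eq (l : List String) (content : String) :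
    (if l.isEmpty then content else nsLoopA l content l.length "") =
      PySem.Str.join "" (l.map (fun ns => "namespace " ++ ns ++ " {\n    ")) ++ content ++
        PySem.Str.join "" (l.reverse.map (fun ns => "\n}  //  " ++ ns)) := by
  cases l with
  | nil =>
    simp only [List.isEmpty_nil, if_true, List.map_nil, List.reverse_nil,
      show PySem.Str.join "" ([] : List String) = "" from rfl]
    rw [String.append_empty, String.empty_append]
  | cons a t =>
    rw [if_neg (by simp)]
    rw [nsLoopA_foldr (a :: t) content (by simp)]
    exact foldr_nsWrap_eq (a :: t) content

-- ===== VERDICT (by name: the statement is the Claim_ definition above) =====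
theorem namespaceGuard_spec : Claim_equal_namespaceGuard := by
  intro namespaceName content _
  unfold Spec_namespaceGuard namespaceGuard namespaceGuard_alt
  exact guard_if_eq _ content
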